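-- pv_equiv track=rewrite | github.com/zlw241/CodeEval | Medium/number_operations.py | op_helper
-- ===== SOURCE A (Python) =====
-- def op_helper(numlist):
--     results_cache = []
--     results_cache.append(numlist[0]*numlist[1])
--     results_cache.append(numlist[0]+numlist[1])
--     results_cache.append(numlist[0]-numlist[1])
--     for i in range(2,5):
--         new_cache = []
--         for c in results_cache:
--             new_cache.append(c*numlist[i])
--             new_cache.append(c-numlist[i])
--             new_cache.append(c+numlist[i])
--         results_cache = new_cache
--     return results_cache
-- ===== SOURCE B (Python) =====
-- def op_helper(numlist):
--     a, b = numlist[0], numlist[1]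
--
--     def apply_first(d, x, y):
--         return x * y if d == 0 else x + y if d == 1 else x - y
--
--     def apply_rest(d, x, y):
--         return x * y if d == 0 else x - y if d == 1 else x + y
--
--     out = []
--     for j in range(81):
--         v = apply_first(j // 27, a, b)
--         v = apply_rest((j // 9) % 3, v, numlist[2])
--         v = apply_rest((j // 3) % 3, v, numlist[3])
--         v = apply_rest(j % 3, v, numlist[4])
--         out.append(v)
--     return out
-- ===== Notes on version B (the rewrite author's own statement) =====
-- stated objective: alternative
-- what changed: B runs a single flat loop over an integer index 0..80, decoding each index's base-3 digits into the four operator choices arithmetically and evaluating that one expression, instead of A's level-by-level growth of a results cache over nested loops.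
import Mathlib
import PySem

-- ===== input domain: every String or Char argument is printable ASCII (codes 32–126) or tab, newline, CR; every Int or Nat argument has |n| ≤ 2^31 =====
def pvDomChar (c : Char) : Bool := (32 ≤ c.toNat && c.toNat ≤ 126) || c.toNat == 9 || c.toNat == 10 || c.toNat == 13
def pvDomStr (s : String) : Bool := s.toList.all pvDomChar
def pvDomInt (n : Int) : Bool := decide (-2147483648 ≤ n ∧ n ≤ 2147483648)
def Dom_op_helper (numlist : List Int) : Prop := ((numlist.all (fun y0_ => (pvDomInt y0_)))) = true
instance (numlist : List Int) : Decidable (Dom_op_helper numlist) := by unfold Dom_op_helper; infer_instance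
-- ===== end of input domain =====

-- B replaces A's level-by-level cache growth by one flat loop over an index 0..80 whose base-3 digits are decoded into the operator choices (objective: alternative).

-- ===== PORT A =====
-- numlist[i] with Python IndexError = none; Pre_ guarantees in range, so the .getD 0 default is never used.
def op_helper (numlist : List Int) : List Int :=
  let g : Int → Int := fun i => (PySem.List.pyGet? numlist i).getD 0
  let init : List Int := [g 0 * g 1, g 0 + g 1, g 0 - g 1]
  (PySem.List.pyRange 2 5 1).foldl
    (fun cache i => cache.foldl (fun nc c => nc ++ [c * g i, c - g i, c + g i]) [])
    init

-- ===== PORT B =====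
def opFirst (d : Int) (x y : Int) : Int :=
  if d = 0 then x * y else if d = 1 then x + y else x - y

def opRest (d : Int) (x y : Int) : Int :=
  if d = 0 then x * y else if d = 1 then x - y else x + y

def op_helper_alt (numlist : List Int) : List Int :=
  let g : Int → Int := fun i => (PySem.List.pyGet? numlist i).getD 0
  let a := g 0
  let b := g 1
  (PySem.List.pyRange 0 81 1).foldl
    (fun out j =>
      let v := opFirst (PySem.Int.floordiv j 27) a b
      let v := opRest (PySem.Int.mod (PySem.Int.floordiv j 9) 3) v (g 2)
      let v := opRest (PySem.Int.mod (PySem.Int.floordiv j 3) 3) v (g 3)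
      let v := opRest (PySem.Int.mod j 3) v (g 4)
      out ++ [v])
    []

-- ===== PRECONDITION & SPEC =====
-- A indexes numlist[0]..numlist[4], raising IndexError on shorter lists; Pre_ excludes exactly those.
def Pre_op_helper (numlist : List Int) : Prop := 5 ≤ numlist.length
instance (numlist : List Int) : Decidable (Pre_op_helper numlist) := by unfold Pre_op_helper; infer_instance
def pvWitness_op_helper : List Int := [1, 2, 3, 4, 5]
def Spec_op_helper (numlist : List Int) (out : List Int) : Prop := out = op_helper_alt numlist
instance (numlist : List Int) (out : List Int) : Decidable (Spec_op_helper numlist out) := by unfold Spec_op_helper; infer_instance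

-- ===== CLAIM (what is proved, stated in full; the proofs are below) =====
def Claim_equal_op_helper : Prop := ∀ (numlist : List Int), Dom_op_helper numlist → Pre_op_helper numlist → Spec_op_helper numlist (op_helper numlist)

-- ===== LEMMAS AND PROOFS =====

-- ===== VERDICT (by name: the statement is the Claim_ definition above) =====
theorem op_helper_spec : Claim_equal_op_helper := by
  intro numlist _ hpre
  obtain ⟨a, b, c, d, e, rest, rfl⟩ :
      ∃ a b c d e rest, numlist = a :: b :: c :: d :: e :: rest := by
    match numlist, hpre with
    | a :: b :: c :: d :: e :: rest, _ => exact ⟨a, b, c, d, e, rest, rfl⟩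
  show op_helper _ = op_helper_alt _
  have hrA : PySem.List.pyRange 2 5 1 = [2, 3, 4] := by decide
  have hrB : PySem.List.pyRange 0 81 1 =
      (List.range 81).map (fun n => (n : Int)) := by decide
  have h0 : (0:Int) ≤ (rest.length:Int) + 1 + 1 + 1 + 1 := by omega
  have h1 : (0:Int) ≤ (rest.length:Int) + 1 + 1 + 1 := by omega
  have h2 : (2:Int) ≤ (rest.length:Int) + 1 + 1 + 1 + 1 := by omega
  have h3 : (3:Int) ≤ (rest.length:Int) + 1 + 1 + 1 + 1 := by omega
  have h4 : (4:Int) ≤ (rest.length:Int) + 1 + 1 + 1 + 1 := by omega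
  simp [op_helper, op_helper_alt, hrA, hrB, PySem.List.pyGet?, PySem.List.pyIdx?,
    h0, h1, h2, h3, h4, List.range_succ, opFirst, opRest,
    PySem.Int.floordiv, PySem.Int.mod]
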